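-- pv_equiv track=rewrite | github.com/lizixi-0x2F/Asterisk-Games | aspp_model/aspp_operator.py | _decode_tokens_to_grid
-- ===== SOURCE A (Python) =====
-- from typing import Dict, Any, List, Tuple
--
-- def _decode_tokens_to_grid(tokens: List[int]) -> List[List[int]]:
--     """从token序列解码回网格"""
--     GRID_START = 10
--     GRID_END = 11
--     ROW_SEP = 12
--
--     # 找到网格边界
--     try:
--         start_idx = tokens.index(GRID_START) + 1
--         end_idx = tokens.index(GRID_END)
--         grid_tokens = tokens[start_idx:end_idx]
--     except ValueError:
--         # 如果没有找到边界token，直接处理颜色token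
--         grid_tokens = [t for t in tokens if 0 <= t <= 9]
--         if not grid_tokens:
--             return [[0]]
--
--     # 按行分隔符分割
--     rows = []
--     current_row = []
--
--     for token in grid_tokens:
--         if token == ROW_SEP:
--             if current_row:
--                 rows.append(current_row)
--                 current_row = []
--         elif 0 <= token <= 9:  # 颜色token
--             current_row.append(token)
--
--     if current_row:
--         rows.append(current_row)
--
--     # 确保至少有一行
--     if not rows:
--         return [[0]]
--
--     return rows
-- ===== SOURCE B (Python) =====
-- def _decode_tokens_to_grid(tokens):
--     """从token序列解码回网格 (split-then-filter re-implementation)"""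
--     GRID_START = 10
--     GRID_END = 11
--     ROW_SEP = 12
--
--     try:
--         start_idx = tokens.index(GRID_START) + 1
--         end_idx = tokens.index(GRID_END)
--         grid_tokens = tokens[start_idx:end_idx]
--     except ValueError:
--         grid_tokens = [t for t in tokens if 0 <= t <= 9]
--         if not grid_tokens:
--             return [[0]]
--
--     # pass 1: cut grid_tokens into raw segments at every ROW_SEP (empties kept)
--     segments = []
--     rest = grid_tokens
--     while ROW_SEP in rest:
--         i = rest.index(ROW_SEP)
--         segments.append(rest[:i])
--         rest = rest[i + 1:]
--     segments.append(rest)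
--
--     # pass 2: keep only the color tokens of each segment, drop empty rows
--     rows = [row for row in ([t for t in seg if 0 <= t <= 9] for seg in segments) if row]
--
--     return rows if rows else [[0]]
-- ===== Notes on version B (the rewrite author's own statement) =====
-- stated objective: alternative
-- what changed: A's single interleaved flush-on-separator accumulator loop is replaced by two passes: first cut grid_tokens into raw segments at each ROW_SEP (a while loop using list.index), then filter each segment to its color tokens and keep the nonempty rows.
import Mathlib
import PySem

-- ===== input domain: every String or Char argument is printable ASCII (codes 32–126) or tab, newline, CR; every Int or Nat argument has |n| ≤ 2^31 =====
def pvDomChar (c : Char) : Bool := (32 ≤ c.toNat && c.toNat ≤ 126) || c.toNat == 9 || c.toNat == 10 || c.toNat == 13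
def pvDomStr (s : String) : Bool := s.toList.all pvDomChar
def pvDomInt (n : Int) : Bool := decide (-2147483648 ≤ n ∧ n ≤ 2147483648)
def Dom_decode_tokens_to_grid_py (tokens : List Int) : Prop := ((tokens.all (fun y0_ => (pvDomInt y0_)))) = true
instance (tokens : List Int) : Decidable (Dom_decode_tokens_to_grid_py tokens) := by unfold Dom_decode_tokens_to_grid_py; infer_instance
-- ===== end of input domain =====

-- B replaces A's interleaved flush-on-separator accumulator loop by two passes
-- (cut grid_tokens into raw segments at each ROW_SEP, then filter each segment
-- to its color tokens and drop empty rows); same cost, different decomposition.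

-- ===== PORT A =====
-- loop body, the accumulator loop with trailing flush, and the [[0]] default of A
def pvStepA (acc : List (List Int) × List Int) (token : Int) : List (List Int) × List Int :=
  if token = 12 then
    (if acc.2 ≠ [] then (acc.1 ++ [acc.2], ([] : List Int)) else acc)
  else if 0 ≤ token ∧ token ≤ 9 then (acc.1, acc.2 ++ [token])
  else acc

def pvLoopA (grid_tokens : List Int) : List (List Int) :=
  let st := grid_tokens.foldl pvStepA ([], [])
  let rows := if st.2 ≠ [] then st.1 ++ [st.2] else st.1
  if rows = [] then [[0]] else rows

def decode_tokens_to_grid_py (tokens : List Int) : List (List Int) :=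
  match PySem.List.index? tokens 10 with
  | some s =>
    match PySem.List.index? tokens 11 with
    | some e => pvLoopA (PySem.List.slice tokens (some ((s : Int) + 1)) (some (e : Int)))
    | none =>
      let grid_tokens := tokens.filter (fun t => decide (0 ≤ t ∧ t ≤ 9))
      if grid_tokens = [] then [[0]] else pvLoopA grid_tokens
  | none =>
    let grid_tokens := tokens.filter (fun t => decide (0 ≤ t ∧ t ≤ 9))
    if grid_tokens = [] then [[0]] else pvLoopA grid_tokens

-- ===== PORT B =====
-- Source B's while loop: cut rest at the first ROW_SEP until none is left
def pvSplit (rest : List Int) : List (List Int) :=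
  match h : PySem.List.index? rest 12 with
  | some i =>
    PySem.List.slice rest none (some (i : Int)) ::
      pvSplit (PySem.List.slice rest (some ((i : Int) + 1)) none)
  | none => [rest]
termination_by rest.length
decreasing_by
  obtain ⟨hk, -, -⟩ := PySem.List.getElem_of_index?_eq_some h
  rw [show ((i : Int) + 1) = (((i + 1 : Nat) : Int)) by push_cast; ring,
      PySem.List.slice_from_natCast, List.length_drop]
  omega


def pvFc (seg : List Int) : List Int := seg.filter (fun t => decide (0 ≤ t ∧ t ≤ 9))

def pvLoopB (grid_tokens : List Int) : List (List Int) :=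
  let rows := ((pvSplit grid_tokens).map pvFc).filter (fun row => row ≠ [])
  if rows = [] then [[0]] else rows


def decode_tokens_to_grid_py_alt (tokens : List Int) : List (List Int) :=
  match PySem.List.index? tokens 10 with
  | some s =>
    match PySem.List.index? tokens 11 with
    | some e => pvLoopB (PySem.List.slice tokens (some ((s : Int) + 1)) (some (e : Int)))
    | none =>
      let grid_tokens := tokens.filter (fun t => decide (0 ≤ t ∧ t ≤ 9))
      if grid_tokens = [] then [[0]] else pvLoopB grid_tokens
  | none =>
    let grid_tokens := tokens.filter (fun t => decide (0 ≤ t ∧ t ≤ 9))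
    if grid_tokens = [] then [[0]] else pvLoopB grid_tokens

-- ===== PRECONDITION & SPEC =====
def Spec_decode_tokens_to_grid_py (tokens : List Int) (out : List (List Int)) : Prop := out = decode_tokens_to_grid_py_alt tokens
instance (tokens : List Int) (out : List (List Int)) : Decidable (Spec_decode_tokens_to_grid_py tokens out) := by unfold Spec_decode_tokens_to_grid_py; infer_instance

-- ===== CLAIM (what is proved, stated in full; the proofs are below) =====
def Claim_equal_decode_tokens_to_grid_py : Prop := ∀ (tokens : List Int), Dom_decode_tokens_to_grid_py tokens → Spec_decode_tokens_to_grid_py tokens (decode_tokens_to_grid_py tokens)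

-- ===== LEMMAS AND PROOFS =====
theorem pvSplit_eq_some {xs : List Int} {i : Nat} (h : PySem.List.index? xs 12 = some i) :
    pvSplit xs = PySem.List.slice xs none (some (i : Int)) ::
      pvSplit (PySem.List.slice xs (some ((i : Int) + 1)) none) := by
  rw [pvSplit]
  split
  case _ i' heq =>
    rw [h] at heq
    obtain rfl : i' = i := (Option.some.inj heq).symm
    rfl
  case _ heq => rw [h] at heq; simp at heq

theorem pvSplit_eq_none {xs : List Int} (h : PySem.List.index? xs 12 = none) :
    pvSplit xs = [xs] := by
  rw [pvSplit]
  split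
  case _ i' heq => rw [h] at heq; simp at heq
  case _ => rfl

theorem pvSplit_cons (t : Int) (ts : List Int) :
    pvSplit (t :: ts) =
      if t = 12 then [] :: pvSplit ts
      else
        match pvSplit ts with
        | h :: r => (t :: h) :: r
        | [] => [[]] := by
  by_cases ht : t = 12
  · subst ht
    rw [pvSplit_eq_some (PySem.List.index?_cons_self _ _), if_pos rfl,
        PySem.List.slice_to_natCast,
        show ((0:Nat):Int) + 1 = ((1:Nat):Int) by norm_num, PySem.List.slice_from_natCast]
    rfl
  · rw [if_neg ht]
    have hne : PySem.List.index? (t :: ts) 12 = (PySem.List.index? ts 12).map (· + 1) :=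
      PySem.List.index?_cons_of_ne (xs := ts) ht
    cases hts : PySem.List.index? ts 12 with
    | none =>
      rw [pvSplit_eq_none (by rw [hne, hts]; rfl), pvSplit_eq_none hts]
    | some i =>
      rw [pvSplit_eq_some (xs := t :: ts) (i := i + 1) (by rw [hne, hts]; rfl),
          pvSplit_eq_some hts]
      have e1 : PySem.List.slice (t :: ts) none (some ((i+1 : Nat) : Int)) = t :: PySem.List.slice ts none (some (i:Int)) := by
        rw [PySem.List.slice_to_natCast, PySem.List.slice_to_natCast]; rfl
      have e2 : PySem.List.slice (t :: ts) (some (((i+1:Nat) : Int) + 1)) none = PySem.List.slice ts (some ((i:Int)+1)) none := by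
        rw [show (((i+1:Nat) : Int) + 1) = (((i+2 : Nat)) : Int) by push_cast; ring,
            PySem.List.slice_from_natCast,
            show ((i:Int)+1) = (((i+1:Nat)):Int) by push_cast; ring,
            PySem.List.slice_from_natCast]
        rfl
      rw [e1, e2]

theorem pvSplit_ne_nil (xs : List Int) : pvSplit xs ≠ [] := by
  rw [pvSplit]; cases h : PySem.List.index? xs 12 <;> simp

theorem pvKey (grid : List Int) (rows : List (List Int)) (cur : List Int) :
    (if (grid.foldl pvStepA (rows, cur)).2 ≠ [] then
        (grid.foldl pvStepA (rows, cur)).1 ++ [(grid.foldl pvStepA (rows, cur)).2]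
      else (grid.foldl pvStepA (rows, cur)).1)
    = rows ++
      (match pvSplit grid with
       | h :: r => ((cur ++ pvFc h) :: r.map pvFc).filter (fun row => row ≠ [])
       | [] => []) := by
  induction grid generalizing rows cur with
  | nil =>
    rw [pvSplit_eq_none rfl]
    simp only [List.foldl_nil, pvFc, List.filter_nil, List.append_nil, List.map_nil,
      List.filter_cons]
    by_cases hc : cur = [] <;> simp [hc]
  | cons t ts ih =>
    rw [List.foldl_cons]
    by_cases ht : t = 12
    · subst ht
      rw [pvSplit_cons, if_pos rfl]
      cases hsp : pvSplit ts with
      | nil => exact absurd hsp (pvSplit_ne_nil ts)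
      | cons h r =>
        by_cases hc : cur = []
        · have hstep : pvStepA (rows, cur) 12 = (rows, []) := by simp [pvStepA, hc]
          rw [hstep, ih rows [], hsp]
          simp [List.filter_cons, pvFc, hc]
        · have hstep : pvStepA (rows, cur) 12 = (rows ++ [cur], []) := by simp [pvStepA, hc]
          rw [hstep, ih (rows ++ [cur]) [], hsp]
          simp [List.filter_cons, hc, pvFc, List.append_assoc]
    · rw [pvSplit_cons, if_neg ht]
      cases hsp : pvSplit ts with
      | nil => exact absurd hsp (pvSplit_ne_nil ts)
      | cons h r =>
        by_cases hcol : 0 ≤ t ∧ t ≤ 9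
        · have hstep : pvStepA (rows, cur) t = (rows, cur ++ [t]) := by simp [pvStepA, ht, hcol]
          rw [hstep, ih rows (cur ++ [t]), hsp]
          simp [pvFc, hcol, List.append_assoc]
        · have hstep : pvStepA (rows, cur) t = (rows, cur) := by simp [pvStepA, ht, hcol]
          rw [hstep, ih rows cur, hsp]
          simp [List.filter_cons, pvFc, hcol]

theorem pvLoopAB (grid : List Int) : pvLoopA grid = pvLoopB grid := by
  have h := pvKey grid [] []
  cases hsp : pvSplit grid with
  | nil => exact absurd hsp (pvSplit_ne_nil grid)
  | cons hd r =>
    rw [hsp] at h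
    simp only [pvLoopA, pvLoopB, h, hsp]
    simp [List.filter_cons, pvFc]

-- ===== VERDICT (by name: the statement is the Claim_ definition above) =====
theorem decode_tokens_to_grid_py_spec : Claim_equal_decode_tokens_to_grid_py := by
  intro tokens _
  unfold Spec_decode_tokens_to_grid_py decode_tokens_to_grid_py decode_tokens_to_grid_py_alt
  cases PySem.List.index? tokens 10 <;> [skip; cases PySem.List.index? tokens 11] <;>
    simp only [pvLoopAB]
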